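-- pv_equiv track=rewrite | github.com/thesilentpsycho/bioinformatics | c1w1/1.1.py | assignment2
-- ===== SOURCE A (Python) =====
-- def assignment2(text, k):
-- 	dict = {}
-- 	max = 0
-- 	max_list = []
-- 	for i in range(0, len(text) - k + 1):
-- 		temp = text[i:i + k]
-- 		if text[i:i + k] not in dict:
-- 			dict[text[i:i + k]] = 0
-- 		else:
-- 			dict[text[i:i + k]] += 1
-- 		if dict[text[i:i + k]] == max:
-- 			max_list.append(text[i:i + k])
-- 		if (dict[text[i:i + k]] > max):
-- 			max_list.clear()
-- 			max = dict[text[i:i + k]]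
-- 			max_list.append(text[i:i + k])
-- 	return max_list
-- ===== SOURCE B (Python) =====
-- def assignment2(text, k):
--     counts = {}
--     last = {}
--     n = len(text) - k + 1
--     for i in range(0, n):
--         kmer = text[i:i + k]
--         counts[kmer] = counts.get(kmer, 0) + 1
--         last[kmer] = i
--     if not counts:
--         return []
--     m = max(counts.values())
--     result = []
--     for i in range(0, n):
--         kmer = text[i:i + k]
--         if counts.get(kmer, 0) == m and last.get(kmer) == i:
--             result.append(kmer)
--     return result
-- ===== Notes on version B (the rewrite author's own statement) =====
-- stated objective: alternative
-- what changed: A maintains counts, a running maximum and a live candidate list (cleared on every new maximum) in one intertwined pass; B makes one counting pass that records each k-mer's count and last start index, takes the maximum count, and a second pass that emits a k-mer exactly at its last occurrence when its count is maximal.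
import Mathlib
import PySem

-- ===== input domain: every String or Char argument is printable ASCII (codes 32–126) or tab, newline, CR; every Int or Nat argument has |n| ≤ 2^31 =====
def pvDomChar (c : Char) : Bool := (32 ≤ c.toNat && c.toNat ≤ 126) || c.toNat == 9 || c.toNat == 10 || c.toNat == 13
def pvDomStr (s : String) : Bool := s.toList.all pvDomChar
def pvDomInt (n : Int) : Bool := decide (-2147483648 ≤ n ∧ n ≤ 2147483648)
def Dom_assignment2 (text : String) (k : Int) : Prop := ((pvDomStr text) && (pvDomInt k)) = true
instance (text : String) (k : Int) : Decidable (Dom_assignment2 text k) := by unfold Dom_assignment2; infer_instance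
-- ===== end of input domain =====

-- B replaces A's single intertwined pass (running max, candidate list cleared on each new max)
-- by two shaped passes: count + last-start-index dicts first, then a filter pass emitting each
-- maximal-count k-mer at its last occurrence; same return value everywhere (objective: alternative).

-- ===== PORT A =====
def assignment2 (text : String) (k : Int) : List String :=
  ((PySem.List.pyRange 0 (PySem.Str.len text - k + 1)).foldl
    (fun (st : PySem.Dict String Int × Int × List String) i =>
      let s := PySem.Str.slice text (some i) (some (i + k))
      let d := if !st.1.contains s then st.1.insert s 0 else st.1.modify s 0 (· + 1)
      let ml := if d.getD s 0 = st.2.1 then st.2.2 ++ [s] else st.2.2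
      if d.getD s 0 > st.2.1 then (d, d.getD s 0, [s]) else (d, st.2.1, ml))
    (PySem.Dict.empty, 0, [])).2.2

-- ===== PORT B =====
def assignment2_alt (text : String) (k : Int) : List String :=
  let n := PySem.Str.len text - k + 1
  let cl := (PySem.List.pyRange 0 n).foldl
    (fun (cl : PySem.Dict String Int × PySem.Dict String Int) i =>
      let s := PySem.Str.slice text (some i) (some (i + k))
      (cl.1.insert s (cl.1.getD s 0 + 1), cl.2.insert s i))
    (PySem.Dict.empty, PySem.Dict.empty)
  if cl.1.items = [] then []
  else
    let m := (PySem.List.max? cl.1.values id).getD 0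
    (PySem.List.pyRange 0 n).foldl
      (fun result i =>
        let s := PySem.Str.slice text (some i) (some (i + k))
        if cl.1.getD s 0 = m ∧ cl.2.get? s = some i then result ++ [s] else result)
      []

-- ===== PRECONDITION & SPEC =====
def Spec_assignment2 (text : String) (k : Int) (out : List String) : Prop := out = assignment2_alt text k
instance (text : String) (k : Int) (out : List String) : Decidable (Spec_assignment2 text k out) := by unfold Spec_assignment2; infer_instance

-- ===== CLAIM (what is proved, stated in full; the proofs are below) =====
def Claim_equal_assignment2 : Prop := ∀ (text : String) (k : Int), Dom_assignment2 text k → Spec_assignment2 text k (assignment2 text k)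

-- ===== LEMMAS AND PROOFS =====

/-- The index range both Pythons loop over. -/
def pvR (text : String) (k : Int) : List Int :=
  PySem.List.pyRange 0 (PySem.Str.len text - k + 1)

/-- The k-mer starting at index `i`. -/
def pvF (text : String) (k : Int) (i : Int) : String :=
  PySem.Str.slice text (some i) (some (i + k))

/-- The list of k-mers, in scan order. -/
def pvYs (text : String) (k : Int) : List String := (pvR text k).map (pvF text k)

/-- One iteration of A's loop body, on the k-mer it sees. -/
def pvStep (st : PySem.Dict String Int × Int × List String) (s : String) :
    PySem.Dict String Int × Int × List String :=
  let d := if !st.1.contains s then st.1.insert s 0 else st.1.modify s 0 (· + 1)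
  let ml := if d.getD s 0 = st.2.1 then st.2.2 ++ [s] else st.2.2
  if d.getD s 0 > st.2.1 then (d, d.getD s 0, [s]) else (d, st.2.1, ml)

/-- A's whole loop, as a fold over the k-mer list. -/
def pvLoopA (ys : List String) : PySem.Dict String Int × Int × List String :=
  ys.foldl pvStep (PySem.Dict.empty, 0, [])

/-- Keep only the last occurrence of each element, in order of last occurrence. -/
def pvKeepLast : List String → List String
  | [] => []
  | y :: t => if y ∈ t then pvKeepLast t else y :: pvKeepLast t

/-- The maximal multiplicity occurring in `ys` (0 for the empty list). -/
def pvMc (ys : List String) : Int :=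
  (PySem.List.max? (ys.map fun s => (ys.count s : Int)) id).getD 0

/-- The common result: elements of maximal multiplicity, ordered by last occurrence. -/
def pvSel (ys : List String) : List String :=
  (pvKeepLast ys).filter (fun t => decide ((ys.count t : Int) = pvMc ys))

/-- B's "last start index" dictionary, as a fold. -/
def pvLast (r : List Int) (f : Int → String) : PySem.Dict String Int :=
  r.foldl (fun d i => d.insert (f i) i) PySem.Dict.empty

lemma pvA_eq (text : String) (k : Int) :
    assignment2 text k = (pvLoopA (pvYs text k)).2.2 := by
  simp only [assignment2, pvLoopA, pvYs, pvR, pvF, List.foldl_map]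
  rfl

lemma pvKeepLast_subset {t : String} {ys : List String} (h : t ∈ pvKeepLast ys) : t ∈ ys := by
  induction ys with
  | nil => simpa [pvKeepLast] using h
  | cons y tl ih =>
    by_cases hm : y ∈ tl
    · simp only [pvKeepLast, if_pos hm] at h
      exact List.mem_cons_of_mem _ (ih h)
    · simp only [pvKeepLast, if_neg hm, List.mem_cons] at h
      rcases h with h | h
      · exact h ▸ List.mem_cons_self
      · exact List.mem_cons_of_mem _ (ih h)
lemma pvKeepLast_append (ys : List String) (s : String) :
    pvKeepLast (ys ++ [s]) = (pvKeepLast ys).filter (fun t => !(t == s)) ++ [s] := by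
  induction ys with
  | nil => simp [pvKeepLast]
  | cons y tl ih =>
    by_cases hm : y ∈ tl
    · have : y ∈ tl ++ [s] := List.mem_append_left _ hm
      simp only [List.cons_append, pvKeepLast, if_pos this, if_pos hm, ih]
    · by_cases hys : y = s
      · have : y ∈ tl ++ [s] := by simp [hys]
        simp only [List.cons_append, pvKeepLast, if_pos this, if_neg hm, ih,
          List.filter_cons]
        simp [hys]
      · have : y ∉ tl ++ [s] := by simp [hm, hys]
        simp only [List.cons_append, pvKeepLast, if_neg this, if_neg hm, ih,
          List.filter_cons]
        simp [hys]
lemma pvMc_nil : pvMc [] = 0 := rfl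

lemma pvMc_le {t : String} {ys : List String} (h : t ∈ ys) : (ys.count t : Int) ≤ pvMc ys := by
  rcases heq : PySem.List.max? (ys.map fun s => (ys.count s : Int)) id with _ | m
  · rw [PySem.List.max?_eq_none_iff] at heq
    simp [List.map_eq_nil_iff] at heq
    simp [heq] at h
  · have := PySem.List.max?_isMax heq ((ys.count t : Int)) (List.mem_map_of_mem h)
    simpa [pvMc, heq] using this
lemma pvMc_attained {ys : List String} (h : ys ≠ []) :
    ∃ t ∈ ys, (ys.count t : Int) = pvMc ys := by
  rcases heq : PySem.List.max? (ys.map fun s => (ys.count s : Int)) id with _ | m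
  · rw [PySem.List.max?_eq_none_iff] at heq
    simp [List.map_eq_nil_iff] at heq
    exact absurd heq h
  · have hm := PySem.List.max?_mem heq
    rcases List.mem_map.1 hm with ⟨t, ht, rfl⟩
    exact ⟨t, ht, by simp [pvMc, heq]⟩
lemma pvMc_pos {ys : List String} (h : ys ≠ []) : 1 ≤ pvMc ys := by
  rcases pvMc_attained h with ⟨t, ht, hc⟩
  have : 0 < ys.count t := List.count_pos_iff.2 ht
  omega
lemma pvMc_nonneg (ys : List String) : 0 ≤ pvMc ys := by
  rcases eq_or_ne ys [] with rfl | h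
  · simp [pvMc_nil]
  · linarith [pvMc_pos h]

lemma pvMc_append (ys : List String) (s : String) :
    pvMc (ys ++ [s]) = max (pvMc ys) ((ys.count s : Int) + 1) := by
  have hne : ys ++ [s] ≠ [] := by simp
  apply le_antisymm
  · rcases pvMc_attained hne with ⟨t, ht, hc⟩
    rw [← hc]
    by_cases hts : t = s
    · subst hts
      simp [List.count_append]
    · have htm : t ∈ ys := by
        rcases List.mem_append.1 ht with h | h
        · exact h
        · simp at h; exact absurd h hts
      have : (ys ++ [s]).count t = ys.count t := by
        simp [List.count_append, List.count_singleton, Ne.symm hts]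
      rw [this]
      exact le_max_of_le_left (pvMc_le htm)
  · rw [max_le_iff]
    constructor
    · rcases eq_or_ne ys [] with rfl | h
      · simpa [pvMc_nil] using pvMc_nonneg ([] ++ [s])
      · rcases pvMc_attained h with ⟨t, ht, hc⟩
        rw [← hc]
        calc (ys.count t : Int) ≤ ((ys ++ [s]).count t : Int) := by
              simp [List.count_append]
          _ ≤ pvMc (ys ++ [s]) := pvMc_le (List.mem_append_left _ ht)
    · have : ((ys ++ [s]).count s : Int) = (ys.count s : Int) + 1 := by
        simp [List.count_append]
      rw [← this]
      exact pvMc_le (by simp)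
lemma pvSel_append (ys : List String) (s : String) :
    pvSel (ys ++ [s]) =
      (pvKeepLast ys).filter
        (fun t => !(t == s) && decide ((ys.count t : Int) = pvMc (ys ++ [s])))
      ++ (if (ys.count s : Int) + 1 = pvMc (ys ++ [s]) then [s] else []) := by
  unfold pvSel
  rw [pvKeepLast_append, List.filter_append, List.filter_filter]
  have hc : ((ys ++ [s]).count s : Int) = (ys.count s : Int) + 1 := by
    simp [List.count_append]
  congr 1
  · apply List.filter_congr
    intro t ht
    by_cases hts : t = s
    · subst hts; simp
    · have hct : (ys ++ [s]).count t = ys.count t := by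
        simp [List.count_append, Ne.symm hts]
      simp [hts, hct, Bool.and_comm]
  · rw [List.filter_singleton]
    by_cases hp : (ys.count s : Int) + 1 = pvMc (ys ++ [s])
    · simp [hp, hc]
    · simp [hp]

lemma pvLoopA_char (ys : List String) :
    (∀ t, (pvLoopA ys).1.contains t = decide (t ∈ ys))
  ∧ (∀ t, t ∈ ys → (pvLoopA ys).1.getD t 0 = (ys.count t : Int) - 1)
  ∧ (pvLoopA ys).2.1 = max (pvMc ys - 1) 0
  ∧ (pvLoopA ys).2.2 = pvSel ys := by
  induction ys using List.reverseRecOn with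
  | nil =>
    refine ⟨?_, ?_, ?_, ?_⟩ <;>
      simp [pvLoopA, pvSel, pvKeepLast, pvMc_nil, PySem.Dict.contains_empty]
  | append_singleton ys s ih =>
    obtain ⟨ihc, ihg, ihm, ihl⟩ := ih
    have hfold : pvLoopA (ys ++ [s]) = pvStep (pvLoopA ys) s := by
      simp [pvLoopA, List.foldl_append]
    -- the updated dictionary and the counter value A reads back
    have hd' : (if !(pvLoopA ys).1.contains s then (pvLoopA ys).1.insert s 0
        else (pvLoopA ys).1.modify s 0 (· + 1)) =
        (if s ∈ ys then (pvLoopA ys).1.modify s 0 (· + 1) else (pvLoopA ys).1.insert s 0) := by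
      rw [ihc s]
      by_cases hs : s ∈ ys <;> simp [hs]
    set d' := (if s ∈ ys then (pvLoopA ys).1.modify s 0 (· + 1)
        else (pvLoopA ys).1.insert s 0) with hd'def
    have hval : d'.getD s 0 = (ys.count s : Int) := by
      by_cases hs : s ∈ ys
      · rw [hd'def, if_pos hs, PySem.Dict.getD_modify_self, ihg s hs]
        ring
      · rw [hd'def, if_neg hs, PySem.Dict.getD_insert_self,
          List.count_eq_zero_of_not_mem hs]
        simp
    have hcont : ∀ t, d'.contains t = decide (t ∈ ys ++ [s]) := by
      intro t
      rw [hd'def]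
      by_cases hs : s ∈ ys
      · rw [if_pos hs, PySem.Dict.contains_modify, ihc t]
        by_cases hts : t = s <;> simp [hts, hs]
      · rw [if_neg hs, PySem.Dict.contains_insert, ihc t]
        by_cases hts : t = s <;> simp [hts, hs]
    have hgetD : ∀ t, t ∈ ys ++ [s] → d'.getD t 0 = ((ys ++ [s]).count t : Int) - 1 := by
      intro t ht
      by_cases hts : t = s
      · subst hts
        rw [hval]
        simp [List.count_append]
      · have htm : t ∈ ys := by
          rcases List.mem_append.1 ht with h' | h'
          · exact h'
          · simp at h'; exact absurd h' hts
        have hcnt : ((ys ++ [s]).count t : Int) = (ys.count t : Int) := by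
          simp [List.count_append, Ne.symm hts]
        rw [hcnt, ← ihg t htm, hd'def]
        by_cases hs : s ∈ ys
        · rw [if_pos hs, PySem.Dict.getD_modify]
          simp [hts]
        · rw [if_neg hs, PySem.Dict.getD_insert]
          simp [hts]
    -- the step, with both ifs still symbolic
    have hstep : pvStep (pvLoopA ys) s =
        (if d'.getD s 0 > (pvLoopA ys).2.1 then (d', d'.getD s 0, [s])
         else (d', (pvLoopA ys).2.1,
           if d'.getD s 0 = (pvLoopA ys).2.1 then (pvLoopA ys).2.2 ++ [s]
           else (pvLoopA ys).2.2)) := by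
      rw [pvStep, hd']
    have hmc' : pvMc (ys ++ [s]) = max (pvMc ys) ((ys.count s : Int) + 1) :=
      pvMc_append ys s
    by_cases hys : ys = []
    · subst hys
      have h1 : pvMc ([] ++ [s]) = 1 := by
        rw [pvMc_append, pvMc_nil]; simp
      have hif1 : ¬ d'.getD s 0 > (pvLoopA ([] : List String)).2.1 := by
        rw [hval, ihm, pvMc_nil]; simp
      have hif2 : d'.getD s 0 = (pvLoopA ([] : List String)).2.1 := by
        rw [hval, ihm, pvMc_nil]; simp
      refine ⟨?_, ?_, ?_, ?_⟩ <;> rw [hfold, hstep, if_neg hif1] <;> dsimp only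
      · exact hcont
      · exact hgetD
      · rw [ihm, pvMc_nil, h1]
        omega
      · rw [if_pos hif2, ihl, pvSel_append, h1]
        simp [pvSel, pvKeepLast]
    · have hmc1 : 1 ≤ pvMc ys := pvMc_pos hys
      have hcsle : (ys.count s : Int) ≤ pvMc ys := by
        by_cases hs : s ∈ ys
        · exact pvMc_le hs
        · rw [List.count_eq_zero_of_not_mem hs]; simpa using le_trans zero_le_one hmc1
      have hmx : (pvLoopA ys).2.1 = pvMc ys - 1 := by
        rw [ihm]; omega
      rcases lt_trichotomy ((ys.count s : Int) + 1) (pvMc ys) with hlt | heq | hgt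
      · -- strictly below the maximum: nothing changes
        have hmceq : pvMc (ys ++ [s]) = pvMc ys := by rw [hmc']; omega
        have hif1 : ¬ d'.getD s 0 > (pvLoopA ys).2.1 := by rw [hval, hmx]; omega
        have hif2 : ¬ d'.getD s 0 = (pvLoopA ys).2.1 := by rw [hval, hmx]; omega
        refine ⟨?_, ?_, ?_, ?_⟩ <;> rw [hfold, hstep, if_neg hif1] <;> dsimp only
        · exact hcont
        · exact hgetD
        · simp only [ihm, hmceq]
        · simp only [if_neg hif2, ihl]
          rw [pvSel_append, hmceq]
          rw [if_neg (by omega : ¬ (ys.count s : Int) + 1 = pvMc ys)]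
          rw [List.append_nil]
          unfold pvSel
          apply (List.filter_congr ?_).symm
          intro t ht
          by_cases hts : t = s
          · subst hts
            have : ¬ (ys.count t : Int) = pvMc ys := by omega
            simp [this]
          · simp [hts]
      · -- ties the maximum: appended at the end
        have hmceq : pvMc (ys ++ [s]) = pvMc ys := by rw [hmc']; omega
        have hif1 : ¬ d'.getD s 0 > (pvLoopA ys).2.1 := by rw [hval, hmx]; omega
        have hif2 : d'.getD s 0 = (pvLoopA ys).2.1 := by rw [hval, hmx]; omega
        refine ⟨?_, ?_, ?_, ?_⟩ <;> rw [hfold, hstep, if_neg hif1] <;> dsimp only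
        · exact hcont
        · exact hgetD
        · simp only [ihm, hmceq]
        · simp only [if_pos hif2, ihl]
          rw [pvSel_append, hmceq, if_pos heq]
          congr 1
          unfold pvSel
          apply List.filter_congr
          intro t ht
          by_cases hts : t = s
          · subst hts
            have : ¬ (ys.count t : Int) = pvMc ys := by omega
            simp [this]
          · simp [hts]
      · -- a new maximum: list cleared
        have hcseq : (ys.count s : Int) = pvMc ys := by omega
        have hmceq : pvMc (ys ++ [s]) = (ys.count s : Int) + 1 := by rw [hmc']; omega
        have hif1 : d'.getD s 0 > (pvLoopA ys).2.1 := by rw [hval, hmx]; omega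
        refine ⟨?_, ?_, ?_, ?_⟩ <;> rw [hfold, hstep, if_pos hif1] <;> dsimp only
        · exact hcont
        · exact hgetD
        · rw [hval, hmceq]
          omega
        · rw [pvSel_append, hmceq, if_pos rfl]
          have : (pvKeepLast ys).filter
              (fun t => !(t == s) && decide ((ys.count t : Int) = pvMc (ys ++ [s]))) = [] := by
            apply List.filter_eq_nil_iff.2
            intro t ht
            have htm : t ∈ ys := pvKeepLast_subset ht
            have : (ys.count t : Int) ≤ pvMc ys := pvMc_le htm
            rw [hmceq]
            simp only [Bool.and_eq_true, not_and, decide_eq_true_eq]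
            intro _
            omega
          rw [hmceq] at this
          rw [this, List.nil_append]

lemma pvLast_get? (r : List Int) (f : Int → String) (t : String) :
    (pvLast r f).get? t = (r.filter (fun j => f j == t)).getLast? := by
  induction r using List.reverseRecOn with
  | nil => simp [pvLast, PySem.Dict.get?_empty]
  | append_singleton r i ih =>
    have hfold : pvLast (r ++ [i]) f = (pvLast r f).insert (f i) i := by
      simp [pvLast, List.foldl_append]
    rw [hfold, PySem.Dict.get?_insert, List.filter_append]
    by_cases hfi : t = f i
    · simp [hfi]
    · have h0 : List.filter (fun j => f j == t) [i] = [] := by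
        simp [Ne.symm hfi]
      rw [if_neg hfi, h0, List.append_nil, ih]

lemma pvFilter_last (r : List Int) (f : Int → String) (q : String → Bool) (h : r.Nodup) :
    (r.filter (fun i =>
        q (f i) && ((r.filter (fun j => f j == f i)).getLast? == some i))).map f
  = (pvKeepLast (r.map f)).filter q := by
  induction r using List.reverseRecOn with
  | nil => simp [pvKeepLast]
  | append_singleton r i0 ih =>
    rw [List.nodup_append] at h
    have hnd : r.Nodup := h.1
    have hni : i0 ∉ r := fun hm => h.2.2 i0 hm i0 (List.mem_singleton_self i0) rfl
    rw [List.filter_append]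
    have h1 : r.filter (fun i => q (f i) &&
          (((r ++ [i0]).filter (fun j => f j == f i)).getLast? == some i))
        = (r.filter (fun i => q (f i) &&
            ((r.filter (fun j => f j == f i)).getLast? == some i))).filter
            (fun i => !(f i == f i0)) := by
      rw [List.filter_filter]
      apply List.filter_congr
      intro i hi
      by_cases hfe : f i0 = f i
      · have hfl : (r ++ [i0]).filter (fun j => f j == f i)
            = r.filter (fun j => f j == f i) ++ [i0] := by
          simp [List.filter_append, hfe]
        have hne : i ≠ i0 := fun e => hni (e ▸ hi)
        rw [hfl]
        simp [Ne.symm hne, hfe]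
      · have hfl : (r ++ [i0]).filter (fun j => f j == f i)
            = r.filter (fun j => f j == f i) := by
          simp [List.filter_append, hfe]
        rw [hfl]
        have hne' : f i ≠ f i0 := fun e => hfe e.symm
        simp [hne']
    have h2 : [i0].filter (fun i => q (f i) &&
          (((r ++ [i0]).filter (fun j => f j == f i)).getLast? == some i))
        = if q (f i0) then [i0] else [] := by
      rw [List.filter_singleton]
      have hfl : (r ++ [i0]).filter (fun j => f j == f i0)
          = r.filter (fun j => f j == f i0) ++ [i0] := by
        simp [List.filter_append]
      rw [hfl]
      simp
    rw [h1, h2, List.map_append]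
    have h3 : ((r.filter (fun i => q (f i) &&
            ((r.filter (fun j => f j == f i)).getLast? == some i))).filter
            (fun i => !(f i == f i0))).map f
        = ((r.filter (fun i => q (f i) &&
            ((r.filter (fun j => f j == f i)).getLast? == some i))).map f).filter
            (fun t => !(t == f i0)) := by
      rw [List.filter_map]
      rfl
    rw [h3, ih hnd, List.map_append]
    simp only [List.map_cons, List.map_nil]
    rw [pvKeepLast_append, List.filter_append]
    congr 1
    · rw [List.filter_filter, List.filter_filter]
      exact List.filter_congr (fun x _ => Bool.and_comm _ _)
    · rw [List.filter_singleton]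
      by_cases hq : q (f i0) <;> simp [hq]

lemma pvValues_max (ys : List String) (h : ys ≠ []) :
    (PySem.List.max? (PySem.Dict.counter ys).values id).getD 0 = pvMc ys := by
  have hvals : (PySem.Dict.counter ys).values
      = (PySem.Set.ofList ys).map (fun t => (ys.count t : Int)) := by
    simp only [PySem.Dict.values, PySem.Dict.items_counter ys, List.map_map]
    rfl
  rcases heq : PySem.List.max? (PySem.Dict.counter ys).values id with _ | m
  · rw [PySem.List.max?_eq_none_iff, hvals, List.map_eq_nil_iff] at heq
    obtain ⟨y, hy⟩ := List.exists_mem_of_ne_nil ys h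
    exact absurd (heq ▸ (PySem.Set.mem_ofList ys y).2 hy) (List.not_mem_nil)
  · simp only [Option.getD_some]
    apply le_antisymm
    · have hm := PySem.List.max?_mem heq
      rw [hvals] at hm
      rcases List.mem_map.1 hm with ⟨t, ht, rfl⟩
      exact pvMc_le ((PySem.Set.mem_ofList ys t).1 ht)
    · rcases pvMc_attained h with ⟨t, ht, hc⟩
      have hmem : (ys.count t : Int) ∈ (PySem.Dict.counter ys).values := by
        rw [hvals]
        exact List.mem_map_of_mem ((PySem.Set.mem_ofList ys t).2 ht)
      have := PySem.List.max?_isMax heq _ hmem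
      simpa [hc] using this

lemma pvB_eq (text : String) (k : Int) :
    assignment2_alt text k =
      if pvR text k = [] then []
      else ((pvR text k).filter (fun i =>
          (decide (((pvYs text k).count (pvF text k i) : Int) = pvMc (pvYs text k))) &&
          (((pvR text k).filter (fun j => pvF text k j == pvF text k i)).getLast? == some i))).map (pvF text k) := by
  unfold assignment2_alt
  dsimp only
  have hpm := PySem.List.foldl_prod_mk
    (f := fun (d : PySem.Dict String Int) (i : Int) =>
      d.insert (PySem.Str.slice text (some i) (some (i + k)))
        (d.getD (PySem.Str.slice text (some i) (some (i + k))) 0 + 1))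
    (g := fun (d : PySem.Dict String Int) (i : Int) =>
      d.insert (PySem.Str.slice text (some i) (some (i + k))) i)
    (PySem.List.pyRange 0 (PySem.Str.len text - k + 1)) PySem.Dict.empty PySem.Dict.empty
  rw [hpm]
  have hcounts : (PySem.List.pyRange 0 (PySem.Str.len text - k + 1)).foldl
      (fun d i => d.insert (PySem.Str.slice text (some i) (some (i + k)))
        (d.getD (PySem.Str.slice text (some i) (some (i + k))) 0 + 1)) PySem.Dict.empty
      = PySem.Dict.counter (pvYs text k) := by
    rw [← PySem.Dict.foldl_insert_getD_add_one_eq_counter (pvYs text k)]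
    rw [pvYs, pvR, List.foldl_map]
    rfl
  have hlast : (PySem.List.pyRange 0 (PySem.Str.len text - k + 1)).foldl
      (fun d i => d.insert (PySem.Str.slice text (some i) (some (i + k))) i) PySem.Dict.empty
      = pvLast (pvR text k) (pvF text k) := rfl
  rw [hcounts, hlast]
  by_cases hr : pvR text k = []
  · have hys : pvYs text k = [] := by rw [pvYs, hr]; rfl
    rw [if_pos hr, hys]
    rw [if_pos (by rw [PySem.Dict.items_counter]; rfl)]
  · have hys : pvYs text k ≠ [] := by
      rw [pvYs]
      simpa [List.map_eq_nil_iff] using hr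
    rw [if_neg hr]
    rw [if_neg ?hne]
    case hne =>
      rw [PySem.Dict.items_counter]
      obtain ⟨y, hy⟩ := List.exists_mem_of_ne_nil _ hys
      intro hcontra
      rw [List.map_eq_nil_iff] at hcontra
      exact absurd (hcontra ▸ (PySem.Set.mem_ofList _ y).2 hy) (List.not_mem_nil)
    rw [pvValues_max _ hys]
    have hfold := PySem.List.foldl_append_if
      (fun i => decide ((PySem.Dict.counter (pvYs text k)).getD (PySem.Str.slice text (some i) (some (i + k))) 0 = pvMc (pvYs text k)
        ∧ (pvLast (pvR text k) (pvF text k)).get? (PySem.Str.slice text (some i) (some (i + k))) = some i))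
      (fun i => PySem.Str.slice text (some i) (some (i + k)))
      (PySem.List.pyRange 0 (PySem.Str.len text - k + 1)) []
    simp only [decide_eq_true_eq] at hfold
    rw [hfold, List.nil_append]
    have hpred : ∀ i ∈ pvR text k,
        decide ((PySem.Dict.counter (pvYs text k)).getD (PySem.Str.slice text (some i) (some (i + k))) 0 = pvMc (pvYs text k)
          ∧ (pvLast (pvR text k) (pvF text k)).get? (PySem.Str.slice text (some i) (some (i + k))) = some i)
        = ((decide (((pvYs text k).count (pvF text k i) : Int) = pvMc (pvYs text k))) &&
          (((pvR text k).filter (fun j => pvF text k j == pvF text k i)).getLast? == some i)) := by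
      intro i _
      rw [PySem.Dict.getD_counter, pvLast_get?]
      show decide (_ ∧ _) = _
      rw [Bool.decide_and]
      congr 1
      exact Eq.symm (Bool.beq_eq_decide_eq _ _)
    rw [show (PySem.List.pyRange 0 (PySem.Str.len text - k + 1)) = pvR text k from rfl]
    rw [List.filter_congr hpred]
    rfl

-- ===== VERDICT (by name: the statement is the Claim_ definition above) =====
theorem assignment2_spec : Claim_equal_assignment2 := by
  unfold Claim_equal_assignment2
  intro text k _
  unfold Spec_assignment2
  rw [pvA_eq, (pvLoopA_char (pvYs text k)).2.2.2, pvB_eq]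
  by_cases hr : pvR text k = []
  · rw [if_pos hr]
    have hys : pvYs text k = [] := by rw [pvYs, hr]; rfl
    rw [hys]
    rfl
  · rw [if_neg hr]
    rw [pvFilter_last (pvR text k) (pvF text k)
      (fun t => decide (((pvYs text k).count t : Int) = pvMc (pvYs text k)))
      (PySem.List.nodup_pyRange_one 0 _)]
    rfl
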